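-- pv_equiv track=rewrite | github.com/v1nnyb0y/university-projects | Coursera.BasePython-main/Coursera/Week.5/Task.16.py | lastMax
-- ===== SOURCE A (Python) =====
-- def lastMax(a):
--     maxEl = -1
--     maxI = -1
--     currId = 0
--     for i in a:
--         if (i >= maxEl):
--             maxEl = i
--             maxI = currId
--         currId += 1
--     return (maxEl, maxI)
-- ===== SOURCE B (Python) =====
-- def lastMax(a):
--     m = -1
--     for i in a:
--         if i > m:
--             m = i
--     last = -1
--     for idx, x in enumerate(a):
--         if x == m:
--             last = idx
--     return (m, last)
-- ===== Notes on version B (the rewrite author's own statement) =====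
-- stated objective: alternative
-- what changed: A's single combined pass (tracking max, its index and a counter together) is split into two independent passes: one computing the max floored at -1, then a pass over enumerate recording the last index equal to it.
import Mathlib
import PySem

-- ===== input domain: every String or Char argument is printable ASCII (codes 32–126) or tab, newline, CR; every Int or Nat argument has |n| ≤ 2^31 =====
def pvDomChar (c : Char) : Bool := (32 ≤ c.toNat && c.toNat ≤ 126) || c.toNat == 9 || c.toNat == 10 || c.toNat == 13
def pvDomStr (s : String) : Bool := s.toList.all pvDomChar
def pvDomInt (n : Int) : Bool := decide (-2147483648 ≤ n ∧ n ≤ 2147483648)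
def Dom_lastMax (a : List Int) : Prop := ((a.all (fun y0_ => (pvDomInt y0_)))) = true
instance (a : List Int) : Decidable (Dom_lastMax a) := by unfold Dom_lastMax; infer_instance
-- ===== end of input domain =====

-- B replaces A's single combined pass by two independent passes (find the max floored at -1, then the last index equal to it); alternative decomposition, same cost.


-- ===== PORT A =====
-- single pass carrying (maxEl, maxI, currId), '>=' comparison as in A
def lastMax (a : List Int) : Int × Int :=
  let s := a.foldl
    (fun (st : Int × Int × Int) i =>
      if i ≥ st.1 then (i, st.2.2, st.2.2 + 1) else (st.1, st.2.1, st.2.2 + 1))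
    (-1, -1, 0)
  (s.1, s.2.1)

-- ===== PORT B =====
-- pass 1: max floored at -1 (strict '>'); pass 2: last index where the element equals it
def lastMax_alt (a : List Int) : Int × Int :=
  let m := a.foldl (fun m i => if i > m then i else m) (-1)
  let last := (PySem.List.enumerate a).foldl
    (fun last (p : Int × Int) => if p.2 = m then p.1 else last) (-1)
  (m, last)

-- ===== PRECONDITION & SPEC =====
def Spec_lastMax (a : List Int) (out : Int × Int) : Prop := out = lastMax_alt a
instance (a : List Int) (out : Int × Int) : Decidable (Spec_lastMax a out) := by unfold Spec_lastMax; infer_instance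

-- ===== CLAIM (what is proved, stated in full; the proofs are below) =====
def Claim_equal_lastMax : Prop := ∀ (a : List Int), Dom_lastMax a → Spec_lastMax a (lastMax a)

-- ===== LEMMAS AND PROOFS =====

-- A's running max (with '>='), and the last-occurrence accumulator with an explicit counter
def pvMax (e : Int) : List Int → Int
  | [] => e
  | i :: t => pvMax (if i ≥ e then i else e) t

def pvLast : List Int → Int → Int → Int → Int
  | [], _, j, _ => j
  | i :: t, M, j, c => pvLast t M (if i = M then c else j) (c + 1)

theorem pvMax_ge : ∀ (t : List Int) (e : Int), e ≤ pvMax e t := by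
  intro t
  induction t with
  | nil => intro e; simp [pvMax]
  | cons i t ih =>
    intro e
    have h := ih (if i ≥ e then i else e)
    simp only [pvMax]
    split_ifs at h ⊢ with hc
    · omega
    · exact h

theorem pvMax_mem : ∀ (t : List Int) (e : Int), pvMax e t = e ∨ pvMax e t ∈ t := by
  intro t
  induction t with
  | nil => intro e; simp [pvMax]
  | cons i t ih =>
    intro e
    show pvMax (if i ≥ e then i else e) t = e ∨ pvMax (if i ≥ e then i else e) t ∈ i :: t
    rcases ih (if i ≥ e then i else e) with h | h
    · by_cases hc : i ≥ e
      · right; rw [if_pos hc] at h ⊢; rw [h]; exact List.mem_cons_self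
      · left; rw [if_neg hc] at h ⊢; exact h
    · right; exact List.mem_cons_of_mem _ h

theorem pvLast_indep : ∀ (t : List Int) (M x y c : Int), M ∈ t →
    pvLast t M x c = pvLast t M y c := by
  intro t
  induction t with
  | nil => intro M x y c h; simp at h
  | cons i t ih =>
    intro M x y c h
    by_cases hi : i = M
    · simp only [pvLast, if_pos hi]
    · simp only [pvLast, if_neg hi]
      rcases List.mem_cons.mp h with h' | h'
      · exact absurd h'.symm hi
      · exact ih M x y (c + 1) h'

-- A's combined fold decomposes into pvMax and pvLast
theorem foldA_eq : ∀ (t : List Int) (e j c : Int),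
    t.foldl
      (fun (st : Int × Int × Int) i =>
        if i ≥ st.1 then (i, st.2.2, st.2.2 + 1) else (st.1, st.2.1, st.2.2 + 1))
      (e, j, c)
    = (pvMax e t, pvLast t (pvMax e t) j c, c + (t.length : Int)) := by
  intro t
  induction t with
  | nil => intro e j c; simp [pvMax, pvLast]
  | cons i t ih =>
    intro e j c
    simp only [List.foldl_cons, pvMax, pvLast]
    by_cases hc : i ≥ e
    · simp only [if_pos hc]; rw [ih]
      refine Prod.ext rfl (Prod.ext ?_ (by simp; ring))
      simp only
      by_cases hi : i = pvMax i t
      · rw [if_pos hi]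
      · rcases pvMax_mem t i with h | h
        · exact absurd h.symm hi
        · rw [if_neg hi]
          exact pvLast_indep t (pvMax i t) c j (c + 1) h
    · simp only [if_neg hc]; rw [ih]
      refine Prod.ext rfl (Prod.ext ?_ (by simp; ring))
      simp only
      have hne : i ≠ pvMax e t := by
        have := pvMax_ge t e; omega
      rw [if_neg hne]

-- the '>' running max equals the '>=' running max
theorem foldMax_eq : ∀ (t : List Int) (e : Int),
    t.foldl (fun m i => if i > m then i else m) e = pvMax e t := by
  intro t
  induction t with
  | nil => intro e; simp [pvMax]
  | cons i t ih =>
    intro e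
    simp only [List.foldl_cons, pvMax]
    by_cases h : i = e
    · subst h; simp [ih]
    · by_cases hgt : i > e
      · have : i ≥ e := by omega
        simp [hgt, this, ih]
      · have : ¬ i ≥ e := by omega
        simp [hgt, this, ih]

-- B's enumerate fold equals pvLast
theorem foldLast_eq : ∀ (t : List Int) (M x c : Int),
    (PySem.List.enumerate t c).foldl
      (fun last (p : Int × Int) => if p.2 = M then p.1 else last) x
    = pvLast t M x c := by
  intro t
  induction t with
  | nil => intro M x c; simp [PySem.List.enumerate_nil, pvLast]
  | cons i t ih =>
    intro M x c
    rw [PySem.List.enumerate_cons]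
    simp only [List.foldl_cons, pvLast]
    rw [ih]

-- ===== VERDICT (by name: the statement is the Claim_ definition above) =====
theorem lastMax_spec : Claim_equal_lastMax := by
  intro a _
  unfold Spec_lastMax lastMax lastMax_alt
  simp only
  rw [foldA_eq, foldMax_eq, foldLast_eq]
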